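-- pv_equiv track=rewrite | github.com/heavenCSH/Few-Shot-SLU-BERT-SIF | evaluate.py | reconstruct_slot_bound
-- ===== SOURCE A (Python) =====
-- def reconstruct_slot_bound(slot_output, slot_ids, slot_label_list): # simple_slot_vocab
--     # 1. 排除不需要的idx
--     real_pred = []
--     # for p_list,l_list in zip(slot_output, slot_ids):
--     #     single_pred = []
--     #     for p,l in zip(p_list,l_list):
--     #         if l == -100: # [pad]
--     #             continue
--     #         single_pred.append(slot_label_list[p])
--     #     real_pred.append(single_pred)
--     for p, l in zip(slot_output, slot_ids):
--         if l == -100: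
--             continue
--         real_pred.append(slot_label_list[p])
--     # 2.恢复真实标签
--     # final_pred = []
--     # for single_pred in real_pred:
--     #     final_single_pred = ['O'] if single_pred[0] == 'O' else ['B-'+single_pred[0]]
--     #     for idx in range(1,len(single_pred)):
--     #         cur_pred = single_pred[idx]
--     #         pre_pred = single_pred[idx-1]
--     #         if cur_pred == 'O':
--     #             final_single_pred.append('O')
--     #         else:
--     #             if cur_pred == pre_pred:
--     #                 final_single_pred.append('I-'+cur_pred)
--     #             else:
--     #                 final_single_pred.append('B-'+cur_pred)
--     #     final_pred.append(final_single_pred)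
--     final_pred = ['O'] if real_pred[0] == 'O' else ['B-' + real_pred[0]]
--     for idx in range(1, len(real_pred)):
--         cur_pred = real_pred[idx]
--         pre_pred = real_pred[idx - 1]
--         if cur_pred == 'O':
--             final_pred.append('O')
--         else:
--             if cur_pred == pre_pred:
--                 final_pred.append('I-'+cur_pred)
--             else:
--                 final_pred.append('B-'+cur_pred)
--
--     return final_pred
-- ===== SOURCE B (Python) =====
-- def reconstruct_slot_bound(slot_output, slot_ids, slot_label_list):
--     # drop pad positions, then rebuild BIO tags by scanning runs of equal labels
--     real_pred = [slot_label_list[p] for p, l in zip(slot_output, slot_ids) if l != -100]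
--     out = []
--     i = 0
--     n = len(real_pred)
--     while i < n:
--         label = real_pred[i]
--         j = i
--         while j < n and real_pred[j] == label:
--             j += 1
--         run = j - i
--         if label == 'O':
--             out.extend(['O'] * run)
--         else:
--             out.append('B-' + label)
--             out.extend(['I-' + label] * (run - 1))
--         i = j
--     return out
-- ===== Notes on version B (the rewrite author's own statement) =====
-- stated objective: alternative
-- what changed: Phase 2's pairwise predecessor comparison at each index is replaced by explicit run detection: a two-pointer scan finds each maximal run of equal labels and emits the whole BIO block (B- head plus I- tail, or a run of O) at once.
-- crash fix: When every zipped position is padding (l == -100, including empty inputs) real_pred is empty and A raises IndexError on real_pred[0]; B naturally returns []. — e.g. on reconstruct_slot_bound([0, 1], [-100, -100], ["O"]): A raises IndexError, B returns []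
import Mathlib
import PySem

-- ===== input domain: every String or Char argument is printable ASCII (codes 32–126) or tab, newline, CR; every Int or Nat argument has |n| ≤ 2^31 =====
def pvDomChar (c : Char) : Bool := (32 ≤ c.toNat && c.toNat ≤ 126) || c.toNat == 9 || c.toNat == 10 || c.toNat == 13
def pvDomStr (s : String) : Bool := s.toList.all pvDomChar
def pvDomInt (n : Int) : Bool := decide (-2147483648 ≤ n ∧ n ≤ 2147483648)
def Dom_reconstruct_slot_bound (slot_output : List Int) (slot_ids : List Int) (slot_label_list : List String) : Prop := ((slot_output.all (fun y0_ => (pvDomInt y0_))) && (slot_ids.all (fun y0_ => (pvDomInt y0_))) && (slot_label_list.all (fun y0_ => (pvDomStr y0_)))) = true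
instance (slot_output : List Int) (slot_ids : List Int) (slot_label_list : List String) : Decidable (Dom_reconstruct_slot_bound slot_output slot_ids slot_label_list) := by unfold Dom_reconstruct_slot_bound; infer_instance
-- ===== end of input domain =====

-- B replaces A's per-index predecessor comparison with an explicit two-pointer scan over
-- maximal runs of equal labels (alternative decomposition, same O(n) cost).


-- ===== PORT A =====
-- phase 1: filtering loop (slot_label_list[p] is exact via pyGetD under Pre_: every kept p is in range)
def pvRealPredA (slot_output : List Int) (slot_ids : List Int) (slot_label_list : List String) : List String :=
  (slot_output.zip slot_ids).foldl
    (fun acc pl => if pl.2 = -100 then acc else acc ++ [PySem.List.pyGetD slot_label_list pl.1 ""])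
    []

def reconstruct_slot_bound (slot_output : List Int) (slot_ids : List Int) (slot_label_list : List String) : List String :=
  let real_pred := pvRealPredA slot_output slot_ids slot_label_list
  -- real_pred[0]: Pre_ excludes empty real_pred (IndexError in Python)
  let head := PySem.List.pyGetD real_pred 0 ""
  let init := if head = "O" then ["O"] else ["B-" ++ head]
  (PySem.List.pyRange 1 real_pred.length 1).foldl
    (fun acc idx =>
      let cur := PySem.List.pyGetD real_pred idx ""
      let pre := PySem.List.pyGetD real_pred (idx - 1) ""
      if cur = "O" then acc ++ ["O"]
      else if cur = pre then acc ++ ["I-" ++ cur] else acc ++ ["B-" ++ cur])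
    init

-- ===== PORT B =====
def pvRealPredB (slot_output : List Int) (slot_ids : List Int) (slot_label_list : List String) : List String :=
  (slot_output.zip slot_ids).filterMap
    (fun pl => if pl.2 = -100 then none else some (PySem.List.pyGetD slot_label_list pl.1 ""))

-- inner while loop: consume the run of `lab`, returning its length and the rest
def pvSpanRun (lab : String) : List String → Nat × List String
  | [] => (0, [])
  | x :: xs =>
    if x = lab then
      let r := pvSpanRun lab xs
      (r.1 + 1, r.2)
    else (0, x :: xs)

theorem pvSpanRun_length_le (lab : String) (xs : List String) : (pvSpanRun lab xs).2.length ≤ xs.length := by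
  induction xs with
  | nil => simp [pvSpanRun]
  | cons x xs ih => by_cases h : x = lab <;> simp [pvSpanRun, h] <;> omega

-- outer while loop over runs
def pvRuns : List String → List String
  | [] => []
  | x :: xs =>
    let r := pvSpanRun x xs
    (if x = "O" then List.replicate (r.1 + 1) "O"
     else ("B-" ++ x) :: List.replicate r.1 ("I-" ++ x)) ++ pvRuns r.2
termination_by l => l.length
decreasing_by
  have := pvSpanRun_length_le x xs
  simp only [List.length_cons]
  omega

def reconstruct_slot_bound_alt (slot_output : List Int) (slot_ids : List Int) (slot_label_list : List String) : List String :=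
  pvRuns (pvRealPredB slot_output slot_ids slot_label_list)

-- ===== PRECONDITION & SPEC =====
-- Pre_ excludes exactly the inputs where Python A raises: some kept (non-pad) pair must exist
-- (else real_pred[0] is an IndexError) and every kept prediction index must be in range for
-- slot_label_list (else slot_label_list[p] is an IndexError).
def Pre_reconstruct_slot_bound (slot_output : List Int) (slot_ids : List Int) (slot_label_list : List String) : Prop :=
  (∃ pl ∈ slot_output.zip slot_ids, pl.2 ≠ -100) ∧
  (∀ pl ∈ slot_output.zip slot_ids, pl.2 ≠ -100 → PySem.Raise.InRange slot_label_list.length pl.1)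
instance (slot_output : List Int) (slot_ids : List Int) (slot_label_list : List String) : Decidable (Pre_reconstruct_slot_bound slot_output slot_ids slot_label_list) := by unfold Pre_reconstruct_slot_bound; infer_instance

def pvWitness_reconstruct_slot_bound : List Int × List Int × List String := ([0, 1, 1, 0], [5, -100, 2, 3], ["O", "loc"])

-- When every zipped position is padding (l == -100, so also for empty zips) real_pred is empty:
-- A raises IndexError on real_pred[0]; B naturally returns [].
def Raises_reconstruct_slot_bound (slot_output : List Int) (slot_ids : List Int) (slot_label_list : List String) : Prop :=
  ∀ pl ∈ slot_output.zip slot_ids, pl.2 = -100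
instance (slot_output : List Int) (slot_ids : List Int) (slot_label_list : List String) : Decidable (Raises_reconstruct_slot_bound slot_output slot_ids slot_label_list) := by unfold Raises_reconstruct_slot_bound; infer_instance
def pvRaiseWitness_reconstruct_slot_bound : List Int × List Int × List String := ([0, 1], [-100, -100], ["O"])
def pvRaiseWitnessOut_reconstruct_slot_bound : List String := []

def Spec_reconstruct_slot_bound (slot_output : List Int) (slot_ids : List Int) (slot_label_list : List String) (out : List String) : Prop := out = reconstruct_slot_bound_alt slot_output slot_ids slot_label_list
instance (slot_output : List Int) (slot_ids : List Int) (slot_label_list : List String) (out : List String) : Decidable (Spec_reconstruct_slot_bound slot_output slot_ids slot_label_list out) := by unfold Spec_reconstruct_slot_bound; infer_instance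

-- ===== CLAIM (what is proved, stated in full; the proofs are below) =====
def Claim_equal_reconstruct_slot_bound : Prop := ∀ (slot_output : List Int) (slot_ids : List Int) (slot_label_list : List String), Dom_reconstruct_slot_bound slot_output slot_ids slot_label_list → Pre_reconstruct_slot_bound slot_output slot_ids slot_label_list → Spec_reconstruct_slot_bound slot_output slot_ids slot_label_list (reconstruct_slot_bound slot_output slot_ids slot_label_list)
def Claim_raises_reconstruct_slot_bound : Prop := (∀ (slot_output : List Int) (slot_ids : List Int) (slot_label_list : List String), Dom_reconstruct_slot_bound slot_output slot_ids slot_label_list → Raises_reconstruct_slot_bound slot_output slot_ids slot_label_list → ¬ Pre_reconstruct_slot_bound slot_output slot_ids slot_label_list) ∧ (Dom_reconstruct_slot_bound (pvRaiseWitness_reconstruct_slot_bound.1) (pvRaiseWitness_reconstruct_slot_bound.2.1) (pvRaiseWitness_reconstruct_slot_bound.2.2) ∧ Raises_reconstruct_slot_bound (pvRaiseWitness_reconstruct_slot_bound.1) (pvRaiseWitness_reconstruct_slot_bound.2.1) (pvRaiseWitness_reconstruct_slot_bound.2.2) ∧ reconstruct_slot_bound_alt (pvRaiseWitness_reconstruct_slot_bound.1)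 (pvRaiseWitness_reconstruct_slot_bound.2.1) (pvRaiseWitness_reconstruct_slot_bound.2.2) = pvRaiseWitnessOut_reconstruct_slot_bound)

-- ===== LEMMAS AND PROOFS =====

-- the tag A assigns at a non-initial position, given the previous label
def pvTagOf (prev cur : String) : String :=
  if cur = "O" then "O" else if cur = prev then "I-" ++ cur else "B-" ++ cur

def pvHeadTag (h : String) : String := if h = "O" then "O" else "B-" ++ h

def pvPairTags : String → List String → List String
  | _, [] => []
  | prev, c :: t => pvTagOf prev c :: pvPairTags c t

def pvTagAll : List String → List String
  | [] => []
  | h :: t => pvHeadTag h :: pvPairTags h t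

-- phase 1: A's append-fold equals B's filterMap
theorem pvRealPred_fold_eq (zs : List (Int × Int)) (f : Int × Int → String) (acc : List String) :
    zs.foldl (fun acc pl => if pl.2 = -100 then acc else acc ++ [f pl]) acc
      = acc ++ zs.filterMap (fun pl => if pl.2 = -100 then none else some (f pl)) := by
  induction zs generalizing acc with
  | nil => simp
  | cons z zs ih =>
    by_cases h : z.2 = -100 <;> simp [h, ih]

theorem pvRealPred_eq (slot_output slot_ids : List Int) (slot_label_list : List String) :
    pvRealPredA slot_output slot_ids slot_label_list = pvRealPredB slot_output slot_ids slot_label_list := by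
  unfold pvRealPredA pvRealPredB
  rw [pvRealPred_fold_eq, List.nil_append]

-- A's index loop computes pvPairTags
theorem pvMapTags (t : List String) (h : String) :
    (List.range t.length).map (fun k => pvTagOf ((h :: t).getD k "") (t.getD k "")) = pvPairTags h t := by
  induction t generalizing h with
  | nil => simp [pvPairTags]
  | cons c t ih =>
    simp only [List.length_cons, List.range_succ_eq_map, List.map_cons, List.map_map]
    simp only [Function.comp_def, List.getD_cons_succ, List.getD_cons_zero]
    exact congrArg (pvTagOf h c :: ·) (ih c)

theorem pvPhaseA_eq (rp : List String) (hne : rp ≠ []) :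
    (PySem.List.pyRange 1 rp.length 1).foldl
      (fun acc idx =>
        let cur := PySem.List.pyGetD rp idx ""
        let pre := PySem.List.pyGetD rp (idx - 1) ""
        if cur = "O" then acc ++ ["O"]
        else if cur = pre then acc ++ ["I-" ++ cur] else acc ++ ["B-" ++ cur])
      (if PySem.List.pyGetD rp 0 "" = "O" then ["O"] else ["B-" ++ PySem.List.pyGetD rp 0 ""])
      = pvTagAll rp := by
  obtain ⟨h, t, rfl⟩ : ∃ h t, rp = h :: t := by
    cases rp with
    | nil => exact absurd rfl hne
    | cons h t => exact ⟨h, t, rfl⟩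
  have hstep : (fun (acc : List String) (idx : Int) =>
      let cur := PySem.List.pyGetD (h :: t) idx ""
      let pre := PySem.List.pyGetD (h :: t) (idx - 1) ""
      if cur = "O" then acc ++ ["O"]
      else if cur = pre then acc ++ ["I-" ++ cur] else acc ++ ["B-" ++ cur])
      = (fun (acc : List String) (idx : Int) =>
        acc ++ [pvTagOf (PySem.List.pyGetD (h :: t) (idx - 1) "") (PySem.List.pyGetD (h :: t) idx "")]) := by
    funext acc idx
    simp only [pvTagOf]
    split_ifs <;> rfl
  rw [hstep]
  rw [PySem.List.foldl_append_singleton_eq_map]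
  rw [PySem.List.pyRange_one]
  have hn : (((h :: t).length : Int) - 1).toNat = t.length := by simp
  rw [hn, List.map_map]
  have hmap : ∀ k ∈ List.range t.length,
      ((fun idx => pvTagOf (PySem.List.pyGetD (h :: t) (idx - 1) "") (PySem.List.pyGetD (h :: t) idx "")) ∘
        (fun k : Nat => (1 : Int) + k)) k
        = pvTagOf ((h :: t).getD k "") (t.getD k "") := by
    intro k _
    simp only [Function.comp_def]
    have h1 : (1 : Int) + (k : Int) - 1 = (k : Int) := by ring
    have h2 : (1 : Int) + (k : Int) = ((k + 1 : Nat) : Int) := by push_cast; ring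
    rw [h1, h2, PySem.List.pyGetD_natCast, PySem.List.pyGetD_natCast]
    simp
  rw [List.map_congr_left hmap, pvMapTags]
  simp only [pvTagAll, pvHeadTag, PySem.List.pyGetD_zero_cons]
  split_ifs <;> rfl

-- B's run scan also computes pvTagAll
theorem pvSpanRun_spec (lab : String) (xs : List String) :
    xs = List.replicate (pvSpanRun lab xs).1 lab ++ (pvSpanRun lab xs).2 ∧
      (∀ y ys, (pvSpanRun lab xs).2 = y :: ys → y ≠ lab) := by
  induction xs with
  | nil => simp [pvSpanRun]
  | cons x xs ih =>
    by_cases h : x = lab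
    · subst h
      refine ⟨?_, ?_⟩
      · simp only [pvSpanRun]
        exact congrArg (x :: ·) ih.1
      · intro y ys hy
        exact ih.2 y ys (by simpa [pvSpanRun] using hy)
    · constructor
      · simp [pvSpanRun, h]
      · intro y ys hy
        simp only [pvSpanRun, if_neg h] at hy
        cases hy
        exact h

theorem pvPairTags_replicate (m : Nat) (h : String) (rest : List String) :
    pvPairTags h (List.replicate m h ++ rest) = List.replicate m (pvTagOf h h) ++ pvPairTags h rest := by
  induction m with
  | zero => simp
  | succ m ih => simp [List.replicate_succ, pvPairTags, ih]

theorem pvPairTags_ne_head (prev r : String) (rest : List String) (hne : r ≠ prev) :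
    pvPairTags prev (r :: rest) = pvHeadTag r :: pvPairTags r rest := by
  simp only [pvPairTags, pvTagOf, pvHeadTag, if_neg hne]

theorem pvTagOf_self (h : String) : pvTagOf h h = if h = "O" then "O" else "I-" ++ h := by
  simp [pvTagOf]

theorem pvRuns_eq (rp : List String) : pvRuns rp = pvTagAll rp := by
  induction hl : rp.length using Nat.strong_induction_on generalizing rp with
  | _ n ih =>
    cases rp with
    | nil => simp [pvRuns, pvTagAll]
    | cons h t =>
      obtain ⟨hdecomp, hhead⟩ := pvSpanRun_spec h t
      have hlen : (pvSpanRun h t).2.length < n := by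
        have := pvSpanRun_length_le h t
        simp only [← hl, List.length_cons]
        omega
      have hrest := ih _ hlen (pvSpanRun h t).2 rfl
      rw [pvRuns]
      rw [hrest]
      have htail : pvPairTags h t
          = List.replicate (pvSpanRun h t).1 (pvTagOf h h) ++ pvTagAll (pvSpanRun h t).2 := by
        conv_lhs => rw [hdecomp]
        rw [pvPairTags_replicate]
        congr 1
        cases hrt : (pvSpanRun h t).2 with
        | nil => simp [pvPairTags, pvTagAll]
        | cons y ys => exact pvPairTags_ne_head h y ys (hhead y ys hrt)
      by_cases hO : h = "O"
      · subst hO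
        simp [pvTagAll, pvHeadTag, htail, pvTagOf_self, List.replicate_succ]
      · simp [pvTagAll, pvHeadTag, htail, pvTagOf_self, hO]

theorem pvRealPredB_ne_nil (slot_output slot_ids : List Int) (slot_label_list : List String)
    (hex : ∃ pl ∈ slot_output.zip slot_ids, pl.2 ≠ -100) :
    pvRealPredB slot_output slot_ids slot_label_list ≠ [] := by
  obtain ⟨pl, hmem, hne⟩ := hex
  unfold pvRealPredB
  intro hnil
  rw [List.filterMap_eq_nil_iff] at hnil
  have := hnil pl hmem
  simp [hne] at this

-- ===== VERDICT (by name: the statement is the Claim_ definition above) =====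
theorem reconstruct_slot_bound_spec : Claim_equal_reconstruct_slot_bound := by
  intro slot_output slot_ids slot_label_list _ hpre
  unfold Spec_reconstruct_slot_bound reconstruct_slot_bound reconstruct_slot_bound_alt
  rw [pvRealPred_eq]
  rw [pvPhaseA_eq _ (pvRealPredB_ne_nil _ _ _ hpre.1), pvRuns_eq]

@[simp] theorem reconstruct_slot_bound_raises : Claim_raises_reconstruct_slot_bound := by
  unfold Claim_raises_reconstruct_slot_bound
  refine ⟨?_, by decide, by decide, ?_⟩
  · intro slot_output slot_ids slot_label_list _ hraise hpre
    obtain ⟨pl, hmem, hne⟩ := hpre.1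
    exact hne (hraise pl hmem)
  · show reconstruct_slot_bound_alt [0, 1] [-100, -100] ["O"] = []
    simp [reconstruct_slot_bound_alt, pvRealPredB, pvRuns]
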